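-- pv_equiv track=rewrite | github.com/LeeHa-Yeon/AlgorithmStudy | 2021_네이버_신입공채/ex2.py | solution
-- ===== SOURCE A (Python) =====
-- def solution(sentence,keyword,sept) :
--
--     keyword_a = keyword
--     for i in range(len(sept)) :
--         if i+1 > len(keyword) :
--             idx = (i+1) % len(keyword)
--             keyword_a+=keyword[idx-1]
--     keyword = keyword_a
--
--
--     sentence_a = list(sentence)
--     before = 0
--     for j in range(len(sept)) :
--         if keyword[j] in sentence_a[before:before+sept[j]]:
--
--             sameIdx = sentence_a[before:before+sept[j]].index(keyword[j])
--             sentence_a.insert(before+sameIdx,keyword[j])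
--             before += sept[j] + 1
--
--         elif len(sentence_a) >= before+sept[j] :
--             sentence_a.insert(before+sept[j],keyword[j])
--             before += sept[j] + 1
--
--
--
--     return "".join(sentence_a)
-- ===== SOURCE B (Python) =====
-- def solution(sentence, keyword, sept):
--     # One pass with a cursor into the original sentence; keyword repetition is
--     # read off with j % len(keyword) instead of pre-building an extended keyword.
--     L = len(keyword)
--     out = ""
--     pos = 0
--     for j, s in enumerate(sept):
--         ch = keyword[j % L]
--         chunk = sentence[pos:pos+s]
--         if ch in chunk:
--             k = chunk.index(ch)
--             out += chunk[:k] + ch + chunk[k:]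
--             pos += s
--         elif len(sentence) >= pos + s:
--             out += chunk + ch
--             pos += s
--     return out + sentence[pos:]
-- ===== Notes on version B (the rewrite author's own statement) =====
-- stated objective: simpler
-- what changed: B drops A's keyword-extension preloop (reading keyword[j % len(keyword)] inline) and replaces A's in-place list mutation with repeated insert/slicing by a single cursor into the untouched sentence and a string accumulator.
-- outside the precondition, e.g. on solution('', 'a', [-2, 3]): A returns 'aa', B returns 'a'
import Mathlib
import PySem

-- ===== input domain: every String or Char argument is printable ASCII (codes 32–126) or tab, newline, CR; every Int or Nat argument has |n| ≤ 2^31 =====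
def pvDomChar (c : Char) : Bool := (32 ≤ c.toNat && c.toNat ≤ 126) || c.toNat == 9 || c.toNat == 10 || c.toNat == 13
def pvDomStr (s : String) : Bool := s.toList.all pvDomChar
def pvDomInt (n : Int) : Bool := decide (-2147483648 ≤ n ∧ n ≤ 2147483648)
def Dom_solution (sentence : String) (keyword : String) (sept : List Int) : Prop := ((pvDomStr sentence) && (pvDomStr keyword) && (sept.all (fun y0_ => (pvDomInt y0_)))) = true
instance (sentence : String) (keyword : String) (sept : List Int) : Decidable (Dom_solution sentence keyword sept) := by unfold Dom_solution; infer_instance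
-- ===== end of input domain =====

-- B drops A's keyword-extension preloop and its in-place list mutation, using a cursor
-- into the untouched sentence and a string accumulator instead (objective: simpler).
-- A and B raise alike (ZeroDivisionError for empty keyword with non-empty sept).

-- ===== PORT A =====
-- first loop of A: extends keyword to keyword_a
def pvAKw (kw : List Char) (n : Nat) : List Char :=
  (List.range n).foldl (fun (acc : List Char) (i : Nat) =>
    if ((i : Int) + 1) > (kw.length : Int) then
      -- 'idx = (i+1) % len(keyword)' raises ZeroDivisionError in Python when kw = [] (excluded by Pre_)
      let idx := PySem.Int.mod ((i : Int) + 1) (kw.length : Int)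
      acc ++ [PySem.List.pyGetD kw (idx - 1) ' ']
    else acc) kw

-- body of A's second loop; state = (sentence_a, before)
def pvAStep (kwa : List Char) (sept : List Int) (st : List Char × Int) (j : Nat) : List Char × Int :=
  let s := PySem.List.pyGetD sept (j : Int) 0
  let ch := PySem.List.pyGetD kwa (j : Int) ' '
  let chunk := PySem.List.slice st.1 (some st.2) (some (st.2 + s))
  if ch ∈ chunk then
    let k : Nat := (PySem.List.index? chunk ch).getD 0
    (PySem.List.insert st.1 (st.2 + (k : Int)) ch, st.2 + s + 1)
  else if (st.1.length : Int) ≥ st.2 + s then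
    (PySem.List.insert st.1 (st.2 + s) ch, st.2 + s + 1)
  else st

def solution (sentence : String) (keyword : String) (sept : List Int) : String :=
  let kwa := pvAKw keyword.toList sept.length
  let st := (List.range sept.length).foldl (pvAStep kwa sept) (sentence.toList, 0)
  String.ofList st.1   -- ''.join over a list of single characters

-- ===== PORT B =====
-- body of B's loop; state = (out, pos); js = one pair from enumerate(sept)
def pvBStep (snt kw : List Char) (st : List Char × Int) (js : Int × Int) : List Char × Int :=
  let ch := PySem.List.pyGetD kw (PySem.Int.mod js.1 (kw.length : Int)) ' '
  let chunk := PySem.List.slice snt (some st.2) (some (st.2 + js.2))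
  if ch ∈ chunk then
    let k : Nat := (PySem.List.index? chunk ch).getD 0
    (st.1 ++ chunk.take k ++ [ch] ++ chunk.drop k, st.2 + js.2)
  else if (snt.length : Int) ≥ st.2 + js.2 then
    (st.1 ++ chunk ++ [ch], st.2 + js.2)
  else st

def solution_alt (sentence : String) (keyword : String) (sept : List Int) : String :=
  let st := (PySem.List.enumerate sept 0).foldl (pvBStep sentence.toList keyword.toList) ([], 0)
  String.ofList (st.1 ++ PySem.List.slice sentence.toList (some st.2) none)

-- ===== PRECONDITION & SPEC =====
-- Pre_ excludes (a) empty keyword with non-empty sept, where both A and B raise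
-- ZeroDivisionError, and (b) sept lists containing a negative entry — negative interval
-- lengths are outside the function's natural domain, and on them A's slice bounds and
-- insert positions wrap to the end of the partially built list, an artefact of the
-- in-place implementation that no one would specify.
def Pre_solution (sentence : String) (keyword : String) (sept : List Int) : Prop :=
  (sept = [] ∨ keyword ≠ "") ∧ ∀ s ∈ sept, 0 ≤ s
instance (sentence : String) (keyword : String) (sept : List Int) : Decidable (Pre_solution sentence keyword sept) := by unfold Pre_solution; infer_instance

def pvWitness_solution : String × String × List Int := ("hire the person", "xyz", [2, 3, 4])

def Spec_solution (sentence : String) (keyword : String) (sept : List Int) (out : String) : Prop := out = solution_alt sentence keyword sept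
instance (sentence : String) (keyword : String) (sept : List Int) (out : String) : Decidable (Spec_solution sentence keyword sept out) := by unfold Spec_solution; infer_instance

-- ===== CLAIM (what is proved, stated in full; the proofs are below) =====
def Claim_equal_solution : Prop := ∀ (sentence : String) (keyword : String) (sept : List Int), Dom_solution sentence keyword sept → Pre_solution sentence keyword sept → Spec_solution sentence keyword sept (solution sentence keyword sept)

-- ===== LEMMAS AND PROOFS =====

def pvG (kw : List Char) (t : Nat) : Char := kw.getD (t % kw.length) ' '

theorem pv_succ_mod (Ln n : Nat) (hL : 0 < Ln) :
    ((n+1) % Ln = 0 ∧ n % Ln = Ln - 1) ∨ ((n+1) % Ln = n % Ln + 1) := by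
  have h : (n+1) % Ln = (n % Ln + 1 % Ln) % Ln := by rw [Nat.add_mod]
  rcases Nat.lt_or_ge 1 Ln with h2 | h2
  · rw [Nat.mod_eq_of_lt h2] at h
    rcases Nat.lt_or_ge (n % Ln + 1) Ln with h3 | h3
    · right; rw [h, Nat.mod_eq_of_lt h3]
    · left
      have h4 : n % Ln < Ln := Nat.mod_lt _ hL
      have h5 : n % Ln + 1 = Ln := by omega
      constructor
      · rw [h, h5, Nat.mod_self]
      · omega
  · have hL1 : Ln = 1 := by omega
    left; simp [hL1, Nat.mod_one]

theorem pvAKw_eq (kw : List Char) (hk : kw ≠ []) (n : Nat) :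
    pvAKw kw n = kw ++ (List.range' kw.length (n - kw.length)).map (pvG kw) := by
  have hL : 0 < kw.length := List.length_pos_of_ne_nil hk
  induction n with
  | zero => simp [pvAKw]
  | succ n ih =>
    rw [pvAKw, List.range_succ, List.foldl_append] at *
    rw [ih]
    rcases Nat.lt_or_ge n kw.length with hn | hn
    · have : ¬ ((n : Int) + 1 > (kw.length : Int)) := by omega
      simp only [List.foldl_cons, List.foldl_nil, this, if_false]
      have h2 : n + 1 - kw.length = n - kw.length := by omega
      rw [h2]
    · have hgt : ((n : Int) + 1 > (kw.length : Int)) := by omega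
      simp only [List.foldl_cons, List.foldl_nil, if_pos hgt]
      have hrange : List.range' kw.length (n + 1 - kw.length) =
          List.range' kw.length (n - kw.length) ++ [n] := by
        have h1 : n + 1 - kw.length = (n - kw.length) + 1 := by omega
        rw [h1, List.range'_concat]
        congr 2
        omega
      rw [hrange, List.map_append, List.map_cons, List.map_nil, List.append_assoc]
      congr 2
      -- the appended character equals pvG kw n
      have hcast : (n : Int) + 1 = ((n + 1 : Nat) : Int) := by push_cast; ring
      rw [hcast, PySem.Int.mod_natCast]
      rcases pv_succ_mod kw.length n hL with ⟨h0, hr⟩ | hs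
    -- m = 0 : index -1, last character
      · rw [h0]
        simp only [Nat.cast_zero, zero_sub]
        rw [PySem.List.pyGetD_neg_one kw ' ' hk]
        unfold pvG
        rw [hr, List.getLast_eq_getElem, List.getD_eq_getElem _ _ (by omega)]
      · rw [hs]
        have : ((n % kw.length + 1 : Nat) : Int) - 1 = ((n % kw.length : Nat) : Int) := by
          push_cast; ring
        rw [this, PySem.List.pyGetD_natCast]
        rfl

theorem pvAKw_getD (kw : List Char) (hk : kw ≠ []) (n j : Nat) (hj : j < n) :
    PySem.List.pyGetD (pvAKw kw n) (j : Int) ' ' = pvG kw j := by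
  have hL : 0 < kw.length := List.length_pos_of_ne_nil hk
  rw [PySem.List.pyGetD_natCast, pvAKw_eq kw hk n]
  rcases Nat.lt_or_ge j kw.length with hjL | hjL
  · rw [List.getD_append _ _ _ _ hjL]
    unfold pvG
    rw [Nat.mod_eq_of_lt hjL]
  · rw [List.getD_append_right _ _ _ _ hjL]
    have hjn : j - kw.length < n - kw.length := by omega
    rw [List.getD_eq_getElem _ _ (by simpa using hjn)]
    simp only [List.getElem_map, List.getElem_range']
    congr 1
    omega

theorem pvStep (snt kw : List Char) (sept : List Int) (hk : kw ≠ [])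
    (j : Nat) (hjlen : j < sept.length) (s : Int) (hsj : sept[j]? = some s)
    (sn : Nat) (hsn : s = (sn : Int)) (acc : List Char) (pos : Nat) :
    ∃ (acc' : List Char) (pos'' : Nat),
      pvBStep snt kw (acc, (pos : Int)) ((j : Int), s) = (acc', (pos'' : Int)) ∧
      pvAStep (pvAKw kw sept.length) sept
          (acc ++ snt.drop pos, (acc.length : Int) + ((pos : Int) - min (pos : Int) (snt.length : Int))) j
        = (acc' ++ snt.drop pos'', (acc'.length : Int) + ((pos'' : Int) - min (pos'' : Int) (snt.length : Int))) := by
  have hch : PySem.List.pyGetD (pvAKw kw sept.length) (j : Int) ' ' = pvG kw j :=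
    pvAKw_getD kw hk sept.length j hjlen
  have hchB : PySem.List.pyGetD kw (PySem.Int.mod (j : Int) (kw.length : Int)) ' ' = pvG kw j := by
    rw [PySem.Int.mod_natCast, PySem.List.pyGetD_natCast]; rfl
  have hsA : PySem.List.pyGetD sept (j : Int) 0 = s := by
    rw [PySem.List.pyGetD_natCast]
    simp [List.getD, hsj]
  set ch := pvG kw j with hchdef
  set tail := snt.drop pos with htail
  have htlen : tail.length = snt.length - pos := by simp [htail]
  have hchunkB : PySem.List.slice snt (some (pos : Int)) (some ((pos : Int) + s)) = tail.take sn := by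
    rw [hsn, PySem.List.slice_natCast_add]
  set chunk := tail.take sn with hchunkdef
  rcases Nat.lt_or_ge snt.length pos with hpos | hpos
  · -- cursor past the end: tail = [], chunk = [], both steps are no-ops
    have htnil : tail = [] := List.drop_eq_nil_of_le (by omega)
    have hcnil : chunk = [] := by rw [hchunkdef, htnil]; simp
    refine ⟨acc, pos, ?_, ?_⟩
    · -- B step is a no-op
      simp only [pvBStep]
      rw [hchB, hchunkB, hcnil]
      rw [if_neg (by simp), if_neg (by omega)]
    · -- A step is a no-op
      have hbe : (acc.length : Int) + ((pos : Int) - min (pos : Int) (snt.length : Int))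
          = ((acc.length + (pos - snt.length) : Nat) : Int) := by omega
      simp only [pvAStep]
      rw [hsA, hch, htnil, List.append_nil]
      rw [hbe, hsn, PySem.List.slice_natCast_add]
      rw [List.drop_eq_nil_of_le (by omega), List.take_nil]
      rw [if_neg (by simp), if_neg (by push_cast; omega)]
      rw [← htail, htnil, List.append_nil]
  · -- cursor inside the sentence
    have hposI : (pos : Int) ≤ (snt.length : Int) := by exact_mod_cast hpos
    have hbe : (acc.length : Int) + ((pos : Int) - min (pos : Int) (snt.length : Int))
        = ((acc.length : Nat) : Int) := by omega
    have hla : (acc ++ tail).length = acc.length + (snt.length - pos) := by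
      simp [htlen]
    have hchunkA : PySem.List.slice (acc ++ tail) (some ((acc.length : Nat) : Int))
        (some (((acc.length : Nat) : Int) + s)) = chunk := by
      rw [hsn, PySem.List.slice_natCast_add, List.drop_left]
    by_cases hmem : ch ∈ chunk
    · -- insertion before the matching character
      have hksome : (PySem.List.index? chunk ch).isSome := by
        rw [PySem.List.index?_isSome_iff]; exact hmem
      obtain ⟨k0, hk0⟩ := Option.isSome_iff_exists.mp hksome
      have hkd : (PySem.List.index? chunk ch).getD 0 = k0 := by rw [hk0]; rfl
      obtain ⟨hklt, hkch, -⟩ := PySem.List.getElem_of_index?_eq_some hk0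
      have hkc : k0 < chunk.length := hklt
      have hksn : k0 ≤ sn := by
        have h1 : chunk.length ≤ sn := by
          rw [hchunkdef]; exact List.length_take_le sn tail
        omega
      have hktail : k0 ≤ tail.length := by
        have h1 : chunk.length ≤ tail.length := by
          rw [hchunkdef]; exact List.length_take_le' sn tail
        omega
      refine ⟨acc ++ chunk.take k0 ++ [ch] ++ chunk.drop k0, pos + sn, ?_, ?_⟩
      · simp only [pvBStep]
        rw [hchB, hchunkB, if_pos hmem, hkd]
        simp only [Prod.mk.injEq]
        refine ⟨?_, ?_⟩
        · simp
        · push_cast [hsn]; ring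
      · simp only [pvAStep]
        rw [hsA, hch, hbe, hchunkA, if_pos hmem, hkd]
        have hidx : ((acc.length : Nat) : Int) + (k0 : Int) = ((acc.length + k0 : Nat) : Int) := by
          push_cast; ring
        rw [hidx, PySem.List.insert_natCast _ _ _ (by rw [List.length_append]; omega)]
        have htk : (acc ++ tail).take (acc.length + k0) = acc ++ tail.take k0 := by
          rw [List.take_append, List.take_of_length_le (by omega)]
          congr 2
          omega
        have hdr : (acc ++ tail).drop (acc.length + k0) = tail.drop k0 := by
          rw [List.drop_append, List.drop_eq_nil_of_le (by omega), List.nil_append]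
          congr 1
          omega
        rw [htk, hdr]
        have hct : chunk.take k0 = tail.take k0 := by
          rw [hchunkdef, List.take_take, min_eq_left hksn]
        have hcd : chunk.drop k0 ++ tail.drop sn = tail.drop k0 := by
          conv_rhs => rw [← List.take_append_drop sn tail]
          rw [List.drop_append_of_le_length (by rw [← hchunkdef]; omega)]
        have hdp : snt.drop (pos + sn) = tail.drop sn := by
          rw [htail, List.drop_drop, Nat.add_comm]
        simp only [Prod.mk.injEq]
        refine ⟨?_, ?_⟩
        · rw [hdp, hct]
          simp only [List.append_assoc, List.cons_append]
          rw [← hcd]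
          simp
        · have hclen : chunk.length = min sn (snt.length - pos) := by
            simp [hchunkdef, htlen]
          simp only [List.length_append, List.length_take, List.length_drop,
            List.length_singleton]
          rw [hsn]
          have : chunk.length ≤ sn := by omega
          push_cast
          omega
    · by_cases hcond : (snt.length : Int) ≥ (pos : Int) + s
      · -- append after the chunk
        have hsnle : pos + sn ≤ snt.length := by
          rw [hsn] at hcond; exact_mod_cast (by omega : ((pos + sn : Nat) : Int) ≤ (snt.length : Int))
        have hclen : chunk.length = sn := by
          simp [hchunkdef, htlen]; omega
        refine ⟨acc ++ chunk ++ [ch], pos + sn, ?_, ?_⟩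
        · simp only [pvBStep]
          rw [hchB, hchunkB, if_neg hmem, if_pos hcond]
          simp only [Prod.mk.injEq, true_and]
          push_cast [hsn]
          ring
        · simp only [pvAStep]
          rw [hsA, hch, hbe, hchunkA, if_neg hmem]
          rw [if_pos (by rw [List.length_append, htlen]; push_cast [hsn]; omega)]
          have hidx : ((acc.length : Nat) : Int) + s = ((acc.length + sn : Nat) : Int) := by
            rw [hsn]; push_cast; ring
          rw [hidx, PySem.List.insert_natCast _ _ _ (by rw [List.length_append]; omega)]
          have htk : (acc ++ tail).take (acc.length + sn) = acc ++ tail.take sn := by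
            rw [List.take_append, List.take_of_length_le (by omega)]
            congr 2
            omega
          have hdr : (acc ++ tail).drop (acc.length + sn) = tail.drop sn := by
            rw [List.drop_append, List.drop_eq_nil_of_le (by omega), List.nil_append]
            congr 1
            omega
          rw [htk, hdr]
          have hdp : snt.drop (pos + sn) = tail.drop sn := by
            rw [htail, List.drop_drop, Nat.add_comm]
          simp only [Prod.mk.injEq]
          refine ⟨?_, ?_⟩
          · rw [hdp, hchunkdef]
            simp [List.append_assoc]
          · simp only [List.length_append, hclen, List.length_singleton]
            push_cast
            omega
      · -- no branch fires: both steps are no-ops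
        refine ⟨acc, pos, ?_, ?_⟩
        · simp only [pvBStep]
          rw [hchB, hchunkB, if_neg hmem, if_neg hcond]
        · simp only [pvAStep]
          rw [hsA, hch, hbe, hchunkA, if_neg hmem]
          rw [if_neg (by rw [List.length_append, htlen]; push_cast; omega)]

theorem pvMain (snt kw : List Char) (sept : List Int) (hk : kw ≠ [])
    (hsep : ∀ s ∈ sept, 0 ≤ s) :
    ∀ (rest : List Int) (j : Nat) (acc : List Char) (pos : Nat),
      rest = sept.drop j →
      ∃ (out : List Char) (pos' : Nat),
        (PySem.List.enumerate rest (j : Int)).foldl (pvBStep snt kw) (acc, (pos : Int))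
          = (out, (pos' : Int)) ∧
        (List.range' j rest.length).foldl (pvAStep (pvAKw kw sept.length) sept)
            (acc ++ snt.drop pos, (acc.length : Int) + ((pos : Int) - min (pos : Int) (snt.length : Int)))
          = (out ++ snt.drop pos', (out.length : Int) + ((pos' : Int) - min (pos' : Int) (snt.length : Int))) := by
  intro rest
  induction rest with
  | nil =>
    intro j acc pos hrest
    exact ⟨acc, pos, rfl, rfl⟩
  | cons s rest' ih =>
    intro j acc pos hrest
    have hjlen : j < sept.length := by
      by_contra h
      rw [List.drop_eq_nil_of_le (by omega)] at hrest
      exact (List.cons_ne_nil s rest') hrest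
    have hsj : sept[j]? = some s := by
      rw [← Nat.add_zero j, ← List.getElem?_drop, ← hrest]
      rfl
    have hs0 : 0 ≤ s := hsep s (List.mem_of_getElem? hsj)
    obtain ⟨sn, hsn⟩ : ∃ sn : Nat, s = (sn : Int) := ⟨s.toNat, (Int.toNat_of_nonneg hs0).symm⟩
    have hrest' : rest' = sept.drop (j+1) := by
      have h := congrArg List.tail hrest
      simpa [List.tail_drop] using h
    obtain ⟨acc', pos'', hB, hA⟩ := pvStep snt kw sept hk j hjlen s hsj sn hsn acc pos
    obtain ⟨out, pos', ihB, ihA⟩ := ih (j+1) acc' pos'' hrest'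
    refine ⟨out, pos', ?_, ?_⟩
    · rw [PySem.List.enumerate_cons, List.foldl_cons, hB]
      have hj1 : (j : Int) + 1 = ((j + 1 : Nat) : Int) := by push_cast; ring
      rw [hj1, ihB]
    · rw [List.length_cons, List.range'_succ, List.foldl_cons, hA, ihA]

-- ===== VERDICT =====
theorem solution_spec : Claim_equal_solution := by
  intro sentence keyword sept hdom hpre
  obtain ⟨hk0, hsep⟩ := hpre
  unfold Spec_solution
  have hsol : solution sentence keyword sept
      = String.ofList (((List.range sept.length).foldl
          (pvAStep (pvAKw keyword.toList sept.length) sept) (sentence.toList, 0)).1) := rfl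
  have halt : solution_alt sentence keyword sept
      = String.ofList ((((PySem.List.enumerate sept 0).foldl
            (pvBStep sentence.toList keyword.toList) ([], 0)).1)
          ++ PySem.List.slice sentence.toList
              (some (((PySem.List.enumerate sept 0).foldl
                (pvBStep sentence.toList keyword.toList) ([], 0)).2)) none) := rfl
  rcases hk0 with hnil | hkw
  · subst hnil
    rw [hsol, halt]
    simp [PySem.List.enumerate_nil]
  · have hk : keyword.toList ≠ [] := fun h => hkw (String.toList_eq_nil_iff.mp h)
    obtain ⟨out, pos', hB, hA⟩ :=
      pvMain sentence.toList keyword.toList sept hk hsep sept 0 [] 0 rfl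
    have hmin : min ((0:Nat) : Int) (sentence.toList.length : Int) = ((0:Nat) : Int) := by
      simp
    rw [hmin] at hA
    simp only [List.nil_append, List.drop_zero, List.length_nil, Nat.cast_zero,
      sub_self, add_zero] at hA hB
    rw [hsol, halt, List.range_eq_range', hA, hB]
    simp only
    rw [PySem.List.slice_from_natCast]
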